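-- pv_equiv track=rewrite | github.com/Ambarish07/py-algo | Babbar/split binary strings.py | solve
-- ===== SOURCE A (Python) =====
-- def solve(s):
--     ans = 0
--     c0 = c1 = 0
--     for i in s:
--         if i == '1':
--             c1 += 1
--         else:
--             c0 += 1
--         if c0 == c1:
--             ans += 1
--     return ans if ans>0 else -1
-- ===== SOURCE B (Python) =====
-- def solve(s):
--     total = sum(1 for k in range(1, len(s) + 1) if 2 * s[:k].count('1') == k)
--     return total if total > 0 else -1
-- ===== Notes on version B (the rewrite author's own statement) =====
-- stated objective: alternative
-- what changed: B drops A's running c0/c1 counters entirely: it tests each prefix independently (a prefix is balanced iff twice its count of one-characters equals its length) and sums the hits, trading A's stateful single pass for a stateless quadratic prefix scan.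
import Mathlib
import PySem

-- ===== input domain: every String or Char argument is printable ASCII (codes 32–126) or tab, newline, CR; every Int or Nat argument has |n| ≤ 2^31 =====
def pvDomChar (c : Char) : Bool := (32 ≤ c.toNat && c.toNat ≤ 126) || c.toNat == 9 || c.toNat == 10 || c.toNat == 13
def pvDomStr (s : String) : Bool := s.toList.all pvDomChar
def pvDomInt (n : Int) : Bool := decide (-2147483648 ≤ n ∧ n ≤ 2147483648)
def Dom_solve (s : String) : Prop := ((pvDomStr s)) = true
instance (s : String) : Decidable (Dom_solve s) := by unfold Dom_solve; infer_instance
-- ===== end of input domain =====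

-- B replaces A's stateful single pass (running c0/c1 counters compared after each char) by a
-- stateless quadratic scan that tests each prefix s[:k] independently via its '1'-count; same values everywhere.

-- ===== PORT A =====
-- state: (ans, c0, c1)
def solve (s : String) : Int :=
  let st := s.toList.foldl
    (fun (st : Int × Int × Int) i =>
      let ans := st.1; let c0 := st.2.1; let c1 := st.2.2
      let (c0, c1) := if i = '1' then (c0, c1 + 1) else (c0 + 1, c1)
      (if c0 = c1 then ans + 1 else ans, c0, c1))
    (0, 0, 0)
  if st.1 > 0 then st.1 else -1

-- ===== PORT B =====
-- total = sum(1 for k in range(1, len(s)+1) if 2 * s[:k].count('1') == k)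
def solve_alt (s : String) : Int :=
  let n : Int := PySem.Str.len s
  let total : Int := (PySem.List.pyRange 1 (n + 1)).foldl
    (fun acc k =>
      acc + (if 2 * (PySem.Str.count (PySem.Str.slice s none (some k)) "1" : Int) = k then 1 else 0))
    0
  if total > 0 then total else -1

-- ===== PRECONDITION & SPEC =====
def Spec_solve (s : String) (out : Int) : Prop := out = solve_alt s
instance (s : String) (out : Int) : Decidable (Spec_solve s out) := by unfold Spec_solve; infer_instance

-- ===== CLAIM (what is proved, stated in full; the proofs are below) =====
def Claim_equal_solve : Prop := ∀ (s : String), Dom_solve s → Spec_solve s (solve s)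

-- ===== LEMMAS AND PROOFS =====

-- prefix balances of l starting from balance b (proof-side characterisation of A's loop)
def prefs (l : List Char) (b : Int) : List Int :=
  match l with
  | [] => []
  | ch :: t => let b' := b + (if ch = '1' then 1 else -1); b' :: prefs t b'

theorem afold_eq (l : List Char) (ans c0 c1 : Int) :
    (l.foldl (fun (st : Int × Int × Int) i =>
        let ans := st.1; let c0 := st.2.1; let c1 := st.2.2
        let (c0, c1) := if i = '1' then (c0, c1 + 1) else (c0 + 1, c1)
        (if c0 = c1 then ans + 1 else ans, c0, c1)) (ans, c0, c1)).1
      = ans + ((prefs l (c1 - c0)).count 0 : Int) := by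
  induction l generalizing ans c0 c1 with
  | nil => simp [prefs]
  | cons ch t ih =>
    by_cases hc : ch = '1' <;>
      simp only [List.foldl, hc, prefs, reduceIte] <;>
      rw [ih] <;>
      simp only [List.count_cons, show c1 + 1 - c0 = c1 - c0 + 1 from by ring,
        show c1 - (c0 + 1) = c1 - c0 + -1 from by ring] <;>
      split_ifs <;> push_cast <;> simp_all only [beq_iff_eq] <;> omega

-- the balance after one more char, as a snoc of the balance list
theorem prefs_append (l : List Char) (c : Char) (b : Int) :
    prefs (l ++ [c]) b
      = prefs l b ++ [b + 2 * ((l ++ [c]).count '1' : Int) - ((l.length : Int) + 1)] := by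
  induction l generalizing b with
  | nil => by_cases hc : c = '1' <;> simp [prefs, hc] <;> ring
  | cons ch t ih =>
    by_cases hc : ch = '1' <;>
      simp only [List.cons_append, prefs, hc, reduceIte, ih, List.count_cons, List.length_cons] <;>
      simp_all only [beq_iff_eq] <;>
      push_cast <;> ring_nf

-- PySem.Chars.count with a single-character needle is List.count
theorem count_go_single (c : Char) (l : List Char) : ∀ (fuel acc : Nat), l.length ≤ fuel →
    PySem.Chars.count.go [c] fuel l acc = acc + l.count c := by
  induction l with
  | nil => intro fuel acc _; cases fuel <;> simp [PySem.Chars.count.go]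
  | cons h t ih =>
    intro fuel acc hle
    cases fuel with
    | zero => simp at hle
    | succ f =>
      have hf : t.length ≤ f := by simpa using hle
      by_cases hc : c = h
      · subst hc
        simp [PySem.Chars.count.go, List.isPrefixOf, ih f (acc + 1) hf]
        omega
      · simp [PySem.Chars.count.go, List.isPrefixOf, Ne.symm hc, hc, ih f acc hf]

theorem count_single (t : List Char) (c : Char) : PySem.Chars.count t [c] = t.count c := by
  simp [PySem.Chars.count, count_go_single c t t.length 0 le_rfl]

-- B's summation loop over the prefixes of l
def btotal (l : List Char) : Int :=
  (PySem.List.pyRange 1 ((l.length : Int) + 1)).foldl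
    (fun acc k =>
      acc + (if 2 * ((PySem.List.slice l none (some k)).count '1' : Int) = k then 1 else 0))
    0

theorem btotal_eq_count (l : List Char) : btotal l = ((prefs l 0).count 0 : Int) := by
  induction l using List.reverseRecOn with
  | nil => simp [btotal, prefs, PySem.List.pyRange]
  | append_singleton l c ih =>
    have hn : ((l ++ [c]).length : Int) + 1 = ((l.length : Int) + 1) + 1 := by
      simp
    rw [btotal, hn, PySem.List.pyRange_one_succ_right (by omega), List.foldl_append]
    have hstep : ∀ (acc : Int) (k : Int), k ∈ PySem.List.pyRange 1 ((l.length : Int) + 1) →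
        acc + (if 2 * ((PySem.List.slice (l ++ [c]) none (some k)).count '1' : Int) = k then 1 else 0)
        = acc + (if 2 * ((PySem.List.slice l none (some k)).count '1' : Int) = k then 1 else 0) := by
      intro acc k hk
      obtain ⟨h1, h2⟩ := (PySem.List.mem_pyRange_one).1 hk
      have hk0 : k = (k.toNat : Int) := by omega
      rw [hk0, PySem.List.slice_to_natCast, PySem.List.slice_to_natCast,
        List.take_append_of_le_length (by omega)]
    simp only [List.foldl_cons, List.foldl_nil]
    rw [PySem.List.foldl_congr_mem _ _ _ _ (fun acc x hx => hstep acc x hx), ← btotal]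
    have hlast : PySem.List.slice (l ++ [c]) none (some ((l.length : Int) + 1)) = l ++ [c] := by
      have : ((l.length : Int) + 1) = (((l ++ [c]).length : Nat) : Int) := by simp
      rw [this, PySem.List.slice_to_natCast, List.take_length]
    rw [hlast, ih, prefs_append]
    simp only [List.count_append, List.count_cons, List.count_nil, beq_iff_eq, zero_add]
    push_cast
    split_ifs <;> omega

theorem solve_eq_alt (s : String) : solve s = solve_alt s := by
  have ha := afold_eq s.toList 0 0 0
  simp only [show (0 : Int) - 0 = 0 by norm_num, zero_add] at ha
  have hb : (PySem.List.pyRange 1 ((PySem.Str.len s : Int) + 1)).foldl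
      (fun acc k =>
        acc + (if 2 * (PySem.Str.count (PySem.Str.slice s none (some k)) "1" : Int) = k then 1 else 0))
      0 = btotal s.toList := by
    simp [btotal, PySem.Str.count_eq, PySem.Str.toList_slice, count_single, PySem.Str.len_eq]
  simp only [solve, solve_alt, ha, hb, btotal_eq_count]

-- ===== VERDICT (by name: the statement is the Claim_ definition above) =====
theorem solve_spec : Claim_equal_solve := by
  intro s _; unfold Spec_solve; exact solve_eq_alt s
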